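-- pv_equiv track=rewrite | github.com/Muz-guzgu/bkaczmarczyk | matura/matura 2024 maj (n)/zad 3.3.py | skrot
-- ===== SOURCE A (Python) =====
-- def skrot(n):
--     m = 0
--     y = 1
--     while n > 0:
--         if not n % 2 == 0:
--             m = m + n % 10 * y
--             y *= 10
--         else:
--             pass
--         n = n // 10
--     return m
-- ===== SOURCE B (Python) =====
-- def skrot(n):
--     if n <= 0:
--         return 0
--     m = 0
--     for c in str(n):
--         if c in "13579":
--             m = 10 * m + int(c)
--     return m
-- ===== Notes on version B (the rewrite author's own statement) =====
-- stated objective: idiomatic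
-- what changed: A extracts odd digits arithmetically, least-significant first, assembling the result with a growing place-value multiplier y; B walks the decimal string str(n) most-significant digit first and Horner-accumulates the kept odd digits.
import Mathlib
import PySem

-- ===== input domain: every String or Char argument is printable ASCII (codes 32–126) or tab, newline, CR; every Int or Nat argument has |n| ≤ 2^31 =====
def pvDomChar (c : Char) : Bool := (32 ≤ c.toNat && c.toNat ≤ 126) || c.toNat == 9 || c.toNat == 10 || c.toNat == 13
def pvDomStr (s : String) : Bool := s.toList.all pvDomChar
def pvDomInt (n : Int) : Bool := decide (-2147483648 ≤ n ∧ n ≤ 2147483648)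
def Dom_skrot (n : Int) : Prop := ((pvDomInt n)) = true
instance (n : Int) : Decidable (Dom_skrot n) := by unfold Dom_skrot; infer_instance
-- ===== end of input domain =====

-- B rewrites A's least-significant-first arithmetic loop (place-value multiplier y) as a
-- most-significant-first Horner pass over str(n) keeping the odd digits; objective: idiomatic.

-- ===== PORT A =====
-- A's while-loop as structural recursion on the state (n, m, y)
def skrotLoop (n m y : Int) : Int :=
  if 0 < n then
    if ¬ PySem.Int.mod n 2 = 0 then
      skrotLoop (PySem.Int.floordiv n 10) (m + PySem.Int.mod n 10 * y) (y * 10)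
    else
      skrotLoop (PySem.Int.floordiv n 10) m y
  else m
termination_by n.toNat
decreasing_by
  all_goals
    simp only [PySem.Int.floordiv_eq_ediv_of_pos (by norm_num : (0:Int) < 10)]
    omega

def skrot (n : Int) : Int := skrotLoop n 0 1

-- ===== PORT B =====
-- loop body of B: 'if c in "13579": m = 10 * m + int(c)';
-- 'c in "13579"' ported as membership of the char among the five chars (exact for a 1-char string),
-- int(c) ported as (ofChars? [c]).getD 0 — int(c) cannot raise there, c is a kept digit of str(n)
def skrotStep (m : Int) (c : Char) : Int :=
  if ['1', '3', '5', '7', '9'].contains c then 10 * m + (PySem.Int.ofChars? [c]).getD 0 else m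

def skrot_alt (n : Int) : Int :=
  if n ≤ 0 then 0 else (PySem.Int.toChars n).foldl skrotStep 0

-- ===== PRECONDITION & SPEC =====
def Spec_skrot (n : Int) (out : Int) : Prop := out = skrot_alt n
instance (n : Int) (out : Int) : Decidable (Spec_skrot n out) := by unfold Spec_skrot; infer_instance

-- ===== CLAIM (what is proved, stated in full; the proofs are below) =====
def Claim_equal_skrot : Prop := ∀ (n : Int), Dom_skrot n → Spec_skrot n (skrot n)

-- ===== LEMMAS AND PROOFS =====

-- the number formed by the odd digits of m (LSB-first composition, as A computes it)
def pvF (m : Nat) : Int :=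
  if m = 0 then 0
  else if m % 2 = 1 then pvF (m / 10) * 10 + (m % 10 : Nat) else pvF (m / 10)
termination_by m
decreasing_by all_goals omega

-- the decimal digit characters of m, MSB first
def pvD (m : Nat) : List Char :=
  if m < 10 then [Nat.digitChar m] else pvD (m / 10) ++ [Nat.digitChar (m % 10)]
termination_by m
decreasing_by all_goals omega

-- number of odd digits of m
def pvK (m : Nat) : Nat :=
  if m < 10 then m % 2 else pvK (m / 10) + (m % 10) % 2
termination_by m
decreasing_by all_goals omega

lemma pv_pvF_zero : pvF 0 = 0 := by rw [pvF]; simp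

lemma pv_toDigitsCore_eq (f : Nat) : ∀ (m : Nat) (acc : List Char), m < 10 ^ f → 0 < f →
    Nat.toDigitsCore 10 f m acc = pvD m ++ acc := by
  induction f with
  | zero => omega
  | succ f ih =>
    intro m acc hm _
    by_cases h10 : m / 10 = 0
    · rw [show Nat.toDigitsCore 10 (f+1) m acc = Nat.digitChar (m % 10) :: acc by
        simp [Nat.toDigitsCore, h10]]
      rw [pvD, if_pos (by omega), show m % 10 = m by omega]
      simp
    · have hf : 0 < f := by
        rcases Nat.eq_zero_or_pos f with hf | hf
        · subst hf; norm_num at hm; omega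
        · exact hf
      have hm' : m / 10 < 10 ^ f := by
        apply Nat.div_lt_of_lt_mul
        rw [pow_succ] at hm; omega
      rw [show Nat.toDigitsCore 10 (f+1) m acc
          = Nat.toDigitsCore 10 f (m / 10) (Nat.digitChar (m % 10) :: acc) by
        simp [Nat.toDigitsCore, h10]]
      conv_rhs => rw [pvD, if_neg (by omega)]
      rw [ih (m / 10) _ hm' hf]
      simp

lemma pv_toChars_pos (n : Int) (h : 0 < n) : PySem.Int.toChars n = pvD n.toNat := by
  rw [PySem.Int.toChars, if_neg (by omega), Nat.toDigits,
    pv_toDigitsCore_eq (n.toNat + 1) n.toNat [] ?_ (by omega)]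
  · simp
  · calc n.toNat < 2 ^ n.toNat := Nat.lt_two_pow_self
      _ ≤ 10 ^ n.toNat := Nat.pow_le_pow_left (by norm_num) _
      _ ≤ 10 ^ (n.toNat + 1) := Nat.pow_le_pow_right (by norm_num) (by omega)

lemma pv_step_digitChar (acc : Int) (d : Nat) (hd : d < 10) :
    skrotStep acc (Nat.digitChar d) = if d % 2 = 1 then 10 * acc + (d : Int) else acc := by
  interval_cases d <;>
    simp [skrotStep, Nat.digitChar,
      show (PySem.Int.ofChars? ['1']).getD 0 = 1 from by decide,
      show (PySem.Int.ofChars? ['3']).getD 0 = 3 from by decide,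
      show (PySem.Int.ofChars? ['5']).getD 0 = 5 from by decide,
      show (PySem.Int.ofChars? ['7']).getD 0 = 7 from by decide,
      show (PySem.Int.ofChars? ['9']).getD 0 = 9 from by decide]

lemma pv_foldl_pvD (m : Nat) : ∀ acc : Int,
    (pvD m).foldl skrotStep acc = acc * 10 ^ pvK m + pvF m := by
  induction m using pvD.induct with
  | case1 m h10 =>
    intro acc
    have hF : pvF m = if m % 2 = 1 then (m : Int) else 0 := by
      by_cases hm : m = 0
      · subst hm; rw [pv_pvF_zero]; simp
      · rw [pvF, if_neg hm, show m / 10 = 0 from by omega, pv_pvF_zero,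
          show m % 10 = m from by omega]
        by_cases hp : m % 2 = 1 <;> simp [hp]
    rw [pvD, if_pos h10, pvK, if_pos h10]
    simp only [List.foldl_cons, List.foldl_nil]
    rw [pv_step_digitChar acc m h10, hF]
    rcases Nat.mod_two_eq_zero_or_one m with hp | hp
    · simp [hp]
    · simp [hp]; ring
  | case2 m h10 ih =>
    intro acc
    have hF : pvF m = if m % 10 % 2 = 1 then pvF (m / 10) * 10 + ((m % 10 : Nat) : Int)
        else pvF (m / 10) := by
      rw [pvF, if_neg (by omega), show m % 2 = m % 10 % 2 from by omega]
    rw [pvD, if_neg h10, pvK, if_neg h10, List.foldl_append]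
    simp only [List.foldl_cons, List.foldl_nil]
    rw [ih acc, pv_step_digitChar _ (m % 10) (by omega), hF]
    rcases Nat.mod_two_eq_zero_or_one (m % 10) with hp | hp
    · simp [hp, pow_succ]
    · simp [hp, pow_succ]; ring

lemma pv_skrotLoop_eq (n m y : Int) : skrotLoop n m y = m + y * pvF n.toNat := by
  induction n, m, y using skrotLoop.induct with
  | case1 n m y hn hodd ih =>
    have hmod2 : PySem.Int.mod n 2 = n % 2 := PySem.Int.mod_eq_emod_of_pos (by norm_num)
    have hmod10 : PySem.Int.mod n 10 = n % 10 := PySem.Int.mod_eq_emod_of_pos (by norm_num)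
    have hdiv : PySem.Int.floordiv n 10 = n / 10 :=
      PySem.Int.floordiv_eq_ediv_of_pos (by norm_num)
    have hodd' : n % 2 = 1 := by rw [hmod2] at hodd; omega
    have hF : pvF n.toNat = pvF (n.toNat / 10) * 10 + ((n.toNat % 10 : Nat) : Int) := by
      rw [pvF, if_neg (by omega), if_pos (by omega)]
    rw [skrotLoop, if_pos hn, if_pos hodd, ih, hmod10, hdiv,
      show (n / 10).toNat = n.toNat / 10 from by omega,
      show (n % 10) = ((n.toNat % 10 : Nat) : Int) from by omega, hF]
    ring
  | case2 n m y hn hodd ih =>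
    have hmod2 : PySem.Int.mod n 2 = n % 2 := PySem.Int.mod_eq_emod_of_pos (by norm_num)
    have hdiv : PySem.Int.floordiv n 10 = n / 10 :=
      PySem.Int.floordiv_eq_ediv_of_pos (by norm_num)
    have heven : n % 2 = 0 := by rw [← hmod2]; exact not_not.mp hodd
    have hF : pvF n.toNat = pvF (n.toNat / 10) := by
      rw [pvF, if_neg (by omega), if_neg (by omega)]
    rw [skrotLoop, if_pos hn, if_neg hodd, ih, hdiv,
      show (n / 10).toNat = n.toNat / 10 from by omega, hF]
  | case3 n m y hn =>
    rw [skrotLoop, if_neg hn, show n.toNat = 0 from by omega, pv_pvF_zero]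
    simp

-- ===== VERDICT (by name: the statement is the Claim_ definition above) =====
theorem skrot_spec : Claim_equal_skrot := by
  intro n _
  unfold Spec_skrot skrot skrot_alt
  rw [pv_skrotLoop_eq]
  by_cases hn : n ≤ 0
  · rw [if_pos hn, show n.toNat = 0 from by omega, pv_pvF_zero]
    simp
  · rw [if_neg hn, pv_toChars_pos n (by omega), pv_foldl_pvD]
    simp
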